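-- pv_equiv track=rewrite | github.com/xiongxianfei/rigorloop | scripts/validate-readme.py | validate_vision_markers
-- ===== SOURCE A (Python) =====
-- VISION_START = "<!-- vision:start -->"
--
-- VISION_END = "<!-- vision:end -->"
--
-- def validate_vision_markers(lines: list[str]) -> list[str]:
--     start_lines = [index for index, line in enumerate(lines, start=1) if line == VISION_START]
--     end_lines = [index for index, line in enumerate(lines, start=1) if line == VISION_END]
--
--     if not start_lines and not end_lines:
--         return []
--     if len(start_lines) != 1 or len(end_lines) != 1:
--         return [
--             "vision front-matter markers must appear as zero or one standalone pair; "
--             f"found {len(start_lines)} start marker(s) and {len(end_lines)} end marker(s)"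
--         ]
--     if start_lines[0] > end_lines[0]:
--         return [
--             "vision front-matter start marker must appear before the end marker; "
--             f"found start on line {start_lines[0]} and end on line {end_lines[0]}"
--         ]
--     return []
-- ===== SOURCE B (Python) =====
-- VISION_START = "<!-- vision:start -->"
--
-- VISION_END = "<!-- vision:end -->"
--
--
-- def validate_vision_markers(lines: list[str]) -> list[str]:
--     # Collapse the input to its sequence of marker events (tag, line number)
--     # and classify that small sequence structurally: the happy path and the
--     # out-of-order path are literal shapes of the event list, so the ordering
--     # check comes from scan order instead of comparing collected positions.
--     events = []
--     for index, line in enumerate(lines, start=1):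
--         if line == VISION_START:
--             events.append(("S", index))
--         elif line == VISION_END:
--             events.append(("E", index))
--     if not events:
--         return []
--     if len(events) == 2 and events[0][0] == "S" and events[1][0] == "E":
--         return []
--     if len(events) == 2 and events[0][0] == "E" and events[1][0] == "S":
--         return [
--             "vision front-matter start marker must appear before the end marker; "
--             f"found start on line {events[1][1]} and end on line {events[0][1]}"
--         ]
--     ns = sum(1 for tag, _ in events if tag == "S")
--     ne = len(events) - ns
--     return [
--         "vision front-matter markers must appear as zero or one standalone pair; "
--         f"found {ns} start marker(s) and {ne} end marker(s)"
--     ]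
-- ===== Notes on version B (the rewrite author's own statement) =====
-- stated objective: alternative
-- what changed: B reduces the input to its sequence of marker events (tag, line) in one pass and classifies that sequence structurally: the valid pair and the out-of-order pair are literal two-element shapes of the event list (ordering comes from scan order, never from comparing collected positions), all other non-empty shapes fall to the count message; A instead materializes two independent index lists in two passes and compares their lengths and heads.
import Mathlib
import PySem

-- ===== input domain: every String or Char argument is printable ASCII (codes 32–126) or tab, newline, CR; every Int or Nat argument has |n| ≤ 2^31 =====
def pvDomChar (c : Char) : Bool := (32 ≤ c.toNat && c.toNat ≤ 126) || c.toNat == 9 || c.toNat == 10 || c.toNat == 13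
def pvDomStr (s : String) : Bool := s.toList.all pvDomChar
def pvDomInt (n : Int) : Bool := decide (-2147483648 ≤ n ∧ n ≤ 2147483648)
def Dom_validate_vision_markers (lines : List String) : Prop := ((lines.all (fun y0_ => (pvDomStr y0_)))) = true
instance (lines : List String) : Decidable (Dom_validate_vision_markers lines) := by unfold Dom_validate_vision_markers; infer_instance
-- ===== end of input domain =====

-- B reduces the input to its sequence of marker events and classifies that sequence's shape
-- structurally (ordering from scan order), instead of A's two index lists; same return value
-- on every input (A is total).

-- ===== PORT A =====
def pvVS : String := "<!-- vision:start -->"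
def pvVE : String := "<!-- vision:end -->"

-- A's comprehension [index for index, line in enumerate(lines, 1) if line == t]
def pvAIdx (t : String) (lines : List String) : List Int :=
  ((PySem.List.enumerate lines 1).filter (fun p => p.2 == t)).map (fun p => p.1)

def validate_vision_markers (lines : List String) : List String :=
  let start_lines := pvAIdx pvVS lines
  let end_lines := pvAIdx pvVE lines
  if start_lines = [] ∧ end_lines = [] then []
  else if start_lines.length ≠ 1 ∨ end_lines.length ≠ 1 then
    ["vision front-matter markers must appear as zero or one standalone pair; found "
      ++ PySem.Int.toStr (start_lines.length : Int) ++ " start marker(s) and "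
      ++ PySem.Int.toStr (end_lines.length : Int) ++ " end marker(s)"]
  else if PySem.List.pyGetD start_lines 0 0 > PySem.List.pyGetD end_lines 0 0 then
    ["vision front-matter start marker must appear before the end marker; found start on line "
      ++ PySem.Int.toStr (PySem.List.pyGetD start_lines 0 0) ++ " and end on line "
      ++ PySem.Int.toStr (PySem.List.pyGetD end_lines 0 0)]
  else []

-- ===== PORT B =====
-- the event-collecting loop: events.append(("S", index)) / ("E", index)
def pvBEvents (lines : List String) : List (String × Int) :=
  (PySem.List.enumerate lines 1).foldl
    (fun ev p =>
      if p.2 == pvVS then ev ++ [("S", p.1)]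
      else if p.2 == pvVE then ev ++ [("E", p.1)]
      else ev) []

def validate_vision_markers_alt (lines : List String) : List String :=
  let events := pvBEvents lines
  if events = [] then []
  else if events.length = 2 ∧ (PySem.List.pyGetD events 0 ("", 0)).1 = "S"
        ∧ (PySem.List.pyGetD events 1 ("", 0)).1 = "E" then []
  else if events.length = 2 ∧ (PySem.List.pyGetD events 0 ("", 0)).1 = "E"
        ∧ (PySem.List.pyGetD events 1 ("", 0)).1 = "S" then
    ["vision front-matter start marker must appear before the end marker; found start on line "
      ++ PySem.Int.toStr (PySem.List.pyGetD events 1 ("", 0)).2 ++ " and end on line "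
      ++ PySem.Int.toStr (PySem.List.pyGetD events 0 ("", 0)).2]
  else
    let ns : Int := events.foldl (fun n p => if p.1 == "S" then n + 1 else n) 0
    let ne : Int := (events.length : Int) - ns
    ["vision front-matter markers must appear as zero or one standalone pair; found "
      ++ PySem.Int.toStr ns ++ " start marker(s) and "
      ++ PySem.Int.toStr ne ++ " end marker(s)"]

-- ===== PRECONDITION & SPEC =====
def Spec_validate_vision_markers (lines : List String) (out : List String) : Prop := out = validate_vision_markers_alt lines
instance (lines : List String) (out : List String) : Decidable (Spec_validate_vision_markers lines out) := by unfold Spec_validate_vision_markers; infer_instance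

-- ===== CLAIM (what is proved, stated in full; the proofs are below) =====
def Claim_equal_validate_vision_markers : Prop := ∀ (lines : List String), Dom_validate_vision_markers lines → Spec_validate_vision_markers lines (validate_vision_markers lines)

-- ===== LEMMAS AND PROOFS =====

-- structural form of B's event list, counting from s
def pvEvts (lines : List String) (s : Int) : List (String × Int) :=
  match lines with
  | [] => []
  | l :: ls =>
      (if l = pvVS then [("S", s)] else if l = pvVE then [("E", s)] else []) ++ pvEvts ls (s + 1)

theorem pvBEvents_eq (lines : List String) :
    ∀ (s : Int) (acc : List (String × Int)),
      (PySem.List.enumerate lines s).foldl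
        (fun ev p =>
          if p.2 == pvVS then ev ++ [("S", p.1)]
          else if p.2 == pvVE then ev ++ [("E", p.1)]
          else ev) acc = acc ++ pvEvts lines s := by
  induction lines with
  | nil => intro s acc; simp [PySem.List.enumerate, pvEvts]
  | cons l ls ih =>
    intro s acc
    rw [PySem.List.enumerate_cons, List.foldl_cons]
    by_cases h1 : l = pvVS
    · have e1 : (l == pvVS) = true := by simp [h1]
      simp only [e1, if_true]
      rw [ih (s + 1) (acc ++ [("S", s)])]
      simp [pvEvts, h1]
    · have e1 : (l == pvVS) = false := by simp [h1]
      by_cases h2 : l = pvVE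
      · have e2 : (l == pvVE) = true := by simp [h2]
        simp only [e1, e2, if_true, Bool.false_eq_true, if_false]
        rw [ih (s + 1) (acc ++ [("E", s)])]
        have hne : ¬ pvVE = pvVS := by decide
        simp [pvEvts, h2, hne]
      · have e2 : (l == pvVE) = false := by simp [h2]
        simp only [e1, e2, Bool.false_eq_true, if_false]
        rw [ih (s + 1) acc]
        simp [pvEvts, h1, h2]

theorem pvAIdxS_eq (lines : List String) :
    ∀ s : Int,
      (((PySem.List.enumerate lines s).filter (fun p => p.2 == pvVS)).map (fun p => p.1))
        = (pvEvts lines s).filterMap (fun p => if p.1 = "S" then some p.2 else none) := by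
  induction lines with
  | nil => intro s; simp [PySem.List.enumerate, pvEvts]
  | cons l ls ih =>
    intro s
    have hne : ¬ pvVE = pvVS := by decide
    have hES : ¬ ("E" : String) = "S" := by decide
    rw [PySem.List.enumerate_cons, List.filter_cons]
    by_cases h1 : l = pvVS
    · have e1 : (l == pvVS) = true := by simp [h1]
      simp [pvEvts, h1, ih]
    · have e1 : (l == pvVS) = false := by simp [h1]
      by_cases h2 : l = pvVE
      · simp [pvEvts, h2, hne, hES, ih]
      · simp [pvEvts, h1, h2, e1, ih]

theorem pvAIdxE_eq (lines : List String) :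
    ∀ s : Int,
      (((PySem.List.enumerate lines s).filter (fun p => p.2 == pvVE)).map (fun p => p.1))
        = (pvEvts lines s).filterMap (fun p => if p.1 = "E" then some p.2 else none) := by
  induction lines with
  | nil => intro s; simp [PySem.List.enumerate, pvEvts]
  | cons l ls ih =>
    intro s
    have hne : ¬ pvVS = pvVE := by decide
    have hSE : ¬ ("S" : String) = "E" := by decide
    rw [PySem.List.enumerate_cons, List.filter_cons]
    by_cases h1 : l = pvVE
    · have e1 : (l == pvVE) = true := by simp [h1]
      have h1' : ¬ pvVE = pvVS := by decide
      simp [pvEvts, h1, h1', ih]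
    · have e1 : (l == pvVE) = false := by simp [h1]
      by_cases h2 : l = pvVS
      · simp [pvEvts, h2, hne, hSE, ih]
      · simp [pvEvts, h1, h2, e1, ih]

theorem pvEvts_lb (lines : List String) :
    ∀ (s : Int) (p : String × Int), p ∈ pvEvts lines s → s ≤ p.2 := by
  induction lines with
  | nil => intro s p hp; simp [pvEvts] at hp
  | cons l ls ih =>
    intro s p hp
    simp only [pvEvts, List.mem_append] at hp
    rcases hp with hp | hp
    · split_ifs at hp <;> simp at hp <;> simp [hp]
    · have := ih (s + 1) p hp; omega

theorem pvEvts_pairwise (lines : List String) :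
    ∀ s : Int, (pvEvts lines s).Pairwise (fun a b => a.2 < b.2) := by
  induction lines with
  | nil => intro s; simp [pvEvts]
  | cons l ls ih =>
    intro s
    have hrest : ∀ p ∈ pvEvts ls (s + 1), s < p.2 := by
      intro p hp; have := pvEvts_lb ls (s + 1) p hp; omega
    simp only [pvEvts]
    split_ifs
    · exact List.pairwise_cons.mpr ⟨hrest, ih (s + 1)⟩
    · exact List.pairwise_cons.mpr ⟨hrest, ih (s + 1)⟩
    · simpa using ih (s + 1)

theorem pvEvts_tags (lines : List String) :
    ∀ (s : Int) (p : String × Int), p ∈ pvEvts lines s → p.1 = "S" ∨ p.1 = "E" := by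
  induction lines with
  | nil => intro s p hp; simp [pvEvts] at hp
  | cons l ls ih =>
    intro s p hp
    simp only [pvEvts, List.mem_append] at hp
    rcases hp with hp | hp
    · split_ifs at hp <;> simp at hp <;> simp [hp]
    · exact ih (s + 1) p hp

-- count of "S" events as a foldl, and length split
theorem pvNs_fold (E : List (String × Int)) :
    ∀ init : Int,
      E.foldl (fun n p => if p.1 == "S" then n + 1 else n) init
        = init + ((E.filterMap (fun p => if p.1 = "S" then some p.2 else none)).length : Int) := by
  induction E with
  | nil => intro init; simp
  | cons a E ih =>
    intro init
    rw [List.foldl_cons]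
    by_cases h : a.1 = "S"
    · have e : (a.1 == "S") = true := by simp [h]
      simp only [e, if_true]
      rw [ih (init + 1)]
      simp [h]
      ring
    · have e : (a.1 == "S") = false := by simp [h]
      simp only [e, Bool.false_eq_true, if_false]
      rw [ih init]
      simp [h]

theorem pvLen_split (E : List (String × Int))
    (htags : ∀ p ∈ E, p.1 = "S" ∨ p.1 = "E") :
    (E.filterMap (fun p => if p.1 = "S" then some p.2 else none)).length
      + (E.filterMap (fun p => if p.1 = "E" then some p.2 else none)).length = E.length := by
  induction E with
  | nil => simp
  | cons a E ih =>
    have ha := htags a (by simp)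
    have ih' := ih (fun p hp => htags p (by simp [hp]))
    rcases ha with h | h <;> simp [h] <;> omega

theorem pyGetD_cons1 {α : Type} (x y : α) (xs : List α) (d : α) :
    PySem.List.pyGetD (x :: y :: xs) 1 d = y := by
  simp [PySem.List.pyGetD, PySem.List.pyIdx?, PySem.List.pyGet?]

-- the shape classification, on an arbitrary event list with the two invariants
theorem pvKey (E : List (String × Int))
    (htags : ∀ p ∈ E, p.1 = "S" ∨ p.1 = "E")
    (hpair : E.Pairwise (fun a b => a.2 < b.2)) :
    (let S := E.filterMap (fun p => if p.1 = "S" then some p.2 else none)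
     let T := E.filterMap (fun p => if p.1 = "E" then some p.2 else none)
     if S = [] ∧ T = [] then ([] : List String)
     else if S.length ≠ 1 ∨ T.length ≠ 1 then
       ["vision front-matter markers must appear as zero or one standalone pair; found "
         ++ PySem.Int.toStr (S.length : Int) ++ " start marker(s) and "
         ++ PySem.Int.toStr (T.length : Int) ++ " end marker(s)"]
     else if PySem.List.pyGetD S 0 0 > PySem.List.pyGetD T 0 0 then
       ["vision front-matter start marker must appear before the end marker; found start on line "
         ++ PySem.Int.toStr (PySem.List.pyGetD S 0 0) ++ " and end on line "
         ++ PySem.Int.toStr (PySem.List.pyGetD T 0 0)]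
     else [])
    = (if E = [] then ([] : List String)
       else if E.length = 2 ∧ (PySem.List.pyGetD E 0 ("", 0)).1 = "S"
             ∧ (PySem.List.pyGetD E 1 ("", 0)).1 = "E" then []
       else if E.length = 2 ∧ (PySem.List.pyGetD E 0 ("", 0)).1 = "E"
             ∧ (PySem.List.pyGetD E 1 ("", 0)).1 = "S" then
         ["vision front-matter start marker must appear before the end marker; found start on line "
           ++ PySem.Int.toStr (PySem.List.pyGetD E 1 ("", 0)).2 ++ " and end on line "
           ++ PySem.Int.toStr (PySem.List.pyGetD E 0 ("", 0)).2]
       else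
         let ns : Int := E.foldl (fun n p => if p.1 == "S" then n + 1 else n) 0
         let ne : Int := (E.length : Int) - ns
         ["vision front-matter markers must appear as zero or one standalone pair; found "
           ++ PySem.Int.toStr ns ++ " start marker(s) and "
           ++ PySem.Int.toStr ne ++ " end marker(s)"]) := by
  have hSE : ¬ ("S" : String) = "E" := by decide
  have hES : ¬ ("E" : String) = "S" := by decide
  rcases E with _ | ⟨a, E⟩
  · simp
  rcases E with _ | ⟨b, E⟩
  · -- one event
    rcases htags a (by simp) with h | h
    · simp [h, hSE]
    · simp [h, hES]
  rcases E with _ | ⟨c, E⟩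
  · -- two events
    have hab : a.2 < b.2 := by
      have := (List.pairwise_cons.mp hpair).1 b (by simp)
      exact this
    rcases htags a (by simp) with ha | ha <;> rcases htags b (by simp) with hb | hb
    · -- S S
      simp [ha, hb, hSE, pyGetD_cons1]
    · -- S E
      simp [ha, hb, hSE, hES, pyGetD_cons1, not_lt.mpr (le_of_lt hab)]
    · -- E S
      simp [ha, hb, hSE, hES, pyGetD_cons1, hab]
    · -- E E
      simp [ha, hb, hES, pyGetD_cons1]
  · -- three or more events
    set E' := a :: b :: c :: E with hE'
    set S := E'.filterMap (fun p => if p.1 = "S" then some p.2 else none) with hS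
    set T := E'.filterMap (fun p => if p.1 = "E" then some p.2 else none) with hT
    have hsplit : S.length + T.length = E'.length := pvLen_split E' htags
    have hlen : E'.length = E.length + 3 := by simp [hE']
    have hne1 : ¬ (S = [] ∧ T = []) := by
      rintro ⟨h1, h2⟩
      rw [h1, h2] at hsplit
      simp [hlen] at hsplit
    have hne2 : S.length ≠ 1 ∨ T.length ≠ 1 := by
      by_contra hc
      rw [not_or, not_not, not_not] at hc
      omega
    have hnsf : E'.foldl (fun n p => if p.1 == "S" then n + 1 else n) 0 = (S.length : Int) := by
      rw [pvNs_fold E' 0]; simp [hS]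
    have hnef : (E'.length : Int) - (S.length : Int) = (T.length : Int) := by omega
    simp only [hE'] at *
    rw [if_neg hne1, if_neg (by simp [hlen] : ¬ ((a :: b :: c :: E).length = 2 ∧ (PySem.List.pyGetD (a :: b :: c :: E) 0 ("", 0)).1 = "S" ∧ (PySem.List.pyGetD (a :: b :: c :: E) 1 ("", 0)).1 = "E")),
       if_neg (by simp [hlen] : ¬ ((a :: b :: c :: E).length = 2 ∧ (PySem.List.pyGetD (a :: b :: c :: E) 0 ("", 0)).1 = "E" ∧ (PySem.List.pyGetD (a :: b :: c :: E) 1 ("", 0)).1 = "S")),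
       if_pos hne2]
    rw [hnsf, hnef]
    simp

theorem validate_vision_markers_spec : Claim_equal_validate_vision_markers := by
  intro lines _
  unfold Spec_validate_vision_markers
  show validate_vision_markers lines = validate_vision_markers_alt lines
  unfold validate_vision_markers validate_vision_markers_alt pvAIdx pvBEvents
  rw [pvBEvents_eq lines 1 []]
  rw [pvAIdxS_eq lines 1, pvAIdxE_eq lines 1]
  simpa using pvKey (pvEvts lines 1) (pvEvts_tags lines 1) (pvEvts_pairwise lines 1)
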